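-- pv_equiv track=rewrite | github.com/DefaultVal-X/TermMT | scripts/mutant/mutant.py | judge_term_in_brackets
-- ===== SOURCE A (Python) =====
-- def judge_term_in_brackets(sentence, term_char_bg, term_char_ed):
--     branket_sign = 0
--     in_branket = False
--     for i in range(len(sentence)):
--         if sentence[i] == "(":
--             branket_sign += 1
--         elif sentence[i] == ")":
--             branket_sign -= 1
--         elif sentence[i] == "（":
--             branket_sign += 1
--         elif sentence[i] == "）":
--             branket_sign -= 1
--         elif sentence[i] == "[":
--             branket_sign += 1
--         elif sentence[i] == "]":
--             branket_sign -= 1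
--         # if any char in term is in brackets, don't take the mutant
--         if i >= term_char_bg and i < term_char_ed:
--             if branket_sign > 0:
--                 in_branket = True
--                 break
--         if i >= term_char_ed:
--             break
--     return in_branket
-- ===== SOURCE B (Python) =====
-- def judge_term_in_brackets(sentence, term_char_bg, term_char_ed):
--     # Divide and conquer: for a segment return (balance, max balance over its
--     # nonempty prefixes); combine halves, then compare the window's max prefix
--     # balance offset by the balance of the text before the window.
--     start = max(0, term_char_bg)
--     end = min(len(sentence), term_char_ed)
--     if end <= start:
--         return False
--
--     def delta(c):
--         return 1 if c in "(（[" else (-1 if c in ")）]" else 0)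
--
--     def solve(lo, hi):
--         if hi - lo == 1:
--             d = delta(sentence[lo])
--             return (d, d)
--         mid = (lo + hi) // 2
--         bL, mL = solve(lo, mid)
--         bR, mR = solve(mid, hi)
--         return (bL + bR, max(mL, bL + mR))
--
--     offset = sum(delta(c) for c in sentence[:start])
--     _, m = solve(start, end)
--     return offset + m > 0
-- ===== Notes on version B (the rewrite author's own statement) =====
-- stated objective: alternative
-- what changed: Replaces A's fused left-to-right scan with early break by a divide-and-conquer over the clamped window computing (balance, max-nonempty-prefix-balance) pairs that are merged from the two halves, plus a separately summed balance offset of the text before the window.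
import Mathlib
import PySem

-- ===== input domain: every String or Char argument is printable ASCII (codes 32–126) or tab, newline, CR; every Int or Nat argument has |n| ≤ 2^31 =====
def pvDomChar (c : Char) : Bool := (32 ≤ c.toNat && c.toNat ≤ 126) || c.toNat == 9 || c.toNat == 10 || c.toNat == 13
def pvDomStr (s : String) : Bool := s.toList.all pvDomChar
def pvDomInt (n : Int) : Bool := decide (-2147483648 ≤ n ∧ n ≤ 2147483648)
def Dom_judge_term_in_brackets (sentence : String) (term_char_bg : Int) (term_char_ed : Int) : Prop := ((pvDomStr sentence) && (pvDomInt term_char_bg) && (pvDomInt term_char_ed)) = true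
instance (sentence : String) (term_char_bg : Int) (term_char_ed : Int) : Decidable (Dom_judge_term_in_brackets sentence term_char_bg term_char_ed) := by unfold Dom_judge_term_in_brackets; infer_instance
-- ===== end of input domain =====

-- B replaces A's fused scan-with-break by a divide-and-conquer over the clamped window computing
-- (balance, max-nonempty-prefix-balance) pairs, plus a summed balance offset of the prefix before the window.

-- ===== PORT A =====
-- the for-loop of A: index i, running branket_sign, early exits (break) become returns
def pvLoopA (cs : List Char) (i : Int) (bg ed : Int) (sign : Int) : Bool :=
  match cs with
  | [] => false
  | c :: rest =>
    let s : Int :=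
      if c = '(' then sign + 1
      else if c = ')' then sign - 1
      else if c = '（' then sign + 1
      else if c = '）' then sign - 1
      else if c = '[' then sign + 1
      else if c = ']' then sign - 1
      else sign
    if bg ≤ i ∧ i < ed ∧ 0 < s then true
    else if ed ≤ i then false
    else pvLoopA rest (i + 1) bg ed s

def judge_term_in_brackets (sentence : String) (term_char_bg : Int) (term_char_ed : Int) : Bool :=
  pvLoopA sentence.toList 0 term_char_bg term_char_ed 0

-- ===== PORT B =====
-- delta(c) of Source B
def pvDelta (c : Char) : Int :=
  if ("(（[".toList).contains c then 1
  else if (")）]".toList).contains c then -1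
  else 0

-- solve(lo, hi) of Source B: only ever called with lo < hi ≤ len; the guard 'hi ≤ lo + 1'
-- (instead of Python's 'hi - lo == 1') and the getD default only make the recursion total.
def pvSolve (cs : List Char) (lo hi : Nat) : Int × Int :=
  if _h : hi ≤ lo + 1 then
    let d := pvDelta (cs.getD lo ' ')
    (d, d)
  else
    let mid := (lo + hi) / 2
    let L := pvSolve cs lo mid
    let R := pvSolve cs mid hi
    (L.1 + R.1, max L.2 (L.1 + R.2))
termination_by hi - lo
decreasing_by all_goals omega

def judge_term_in_brackets_alt (sentence : String) (term_char_bg : Int) (term_char_ed : Int) : Bool :=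
  let cs := sentence.toList
  let start : Int := max 0 term_char_bg
  let stop : Int := min (cs.length : Int) term_char_ed
  if stop ≤ start then false
  else
    -- start ≥ 0, so the slice sentence[:start] is 'take start.toNat'
    let offset : Int := ((cs.take start.toNat).map pvDelta).sum
    let m := (pvSolve cs start.toNat stop.toNat).2
    decide (0 < offset + m)

-- ===== PRECONDITION & SPEC =====
def Spec_judge_term_in_brackets (sentence : String) (term_char_bg : Int) (term_char_ed : Int) (out : Bool) : Prop := out = judge_term_in_brackets_alt sentence term_char_bg term_char_ed
instance (sentence : String) (term_char_bg : Int) (term_char_ed : Int) (out : Bool) : Decidable (Spec_judge_term_in_brackets sentence term_char_bg term_char_ed out) := by unfold Spec_judge_term_in_brackets; infer_instance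

-- ===== CLAIM (what is proved, stated in full; the proofs are below) =====
def Claim_equal_judge_term_in_brackets : Prop := ∀ (sentence : String) (term_char_bg : Int) (term_char_ed : Int), Dom_judge_term_in_brackets sentence term_char_bg term_char_ed → Spec_judge_term_in_brackets sentence term_char_bg term_char_ed (judge_term_in_brackets sentence term_char_bg term_char_ed)

-- ===== LEMMAS AND PROOFS =====

-- balance of the prefix of length k
def pvS (cs : List Char) (k : Nat) : Int := ((cs.take k).map pvDelta).sum

lemma pvStepA_eq (c : Char) (sign : Int) :
    (if c = '(' then sign + 1
     else if c = ')' then sign - 1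
     else if c = '（' then sign + 1
     else if c = '）' then sign - 1
     else if c = '[' then sign + 1
     else if c = ']' then sign - 1
     else sign) = sign + pvDelta c := by
  unfold pvDelta
  split_ifs <;> simp_all <;> omega

lemma pvS_succ (cs : List Char) (k : Nat) (hk : k < cs.length) :
    pvS cs (k + 1) = pvS cs k + pvDelta (cs.getD k ' ') := by
  unfold pvS
  have h1 : cs.take (k + 1) = cs.take k ++ [cs[k]] := by
    rw [List.take_add_one, List.getElem?_eq_getElem hk]
    rfl
  rw [h1, List.map_append, List.sum_append]
  simp [List.getD_eq_getElem?_getD, List.getElem?_eq_getElem hk]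

-- characterisation of A's loop
lemma pvLoopA_iff (cs : List Char) : ∀ (i bg ed sign : Int),
    pvLoopA cs i bg ed sign =
      decide (∃ k : Nat, k < cs.length ∧ bg ≤ i + k ∧ i + k < ed ∧ 0 < sign + pvS cs (k + 1)) := by
  induction cs with
  | nil => intro i bg ed sign; simp [pvLoopA]
  | cons c rest ih =>
    intro i bg ed sign
    rw [pvLoopA]
    rw [pvStepA_eq]
    by_cases h1 : bg ≤ i ∧ i < ed ∧ 0 < sign + pvDelta c
    · rw [if_pos h1]
      symm
      rw [decide_eq_true_iff]
      exact ⟨0, by simp, by simpa using h1.1, by simpa using h1.2.1, by simpa [pvS] using h1.2.2⟩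
    · rw [if_neg h1]
      by_cases h2 : ed ≤ i
      · rw [if_pos h2]
        symm
        rw [decide_eq_false_iff_not]
        rintro ⟨k, -, -, hlt, -⟩
        have : (0:Int) ≤ k := Int.natCast_nonneg k
        omega
      · rw [if_neg h2]
        rw [ih (i+1) bg ed (sign + pvDelta c)]
        rw [decide_eq_decide]
        constructor
        · rintro ⟨k, hk, hb, he, hs⟩
          refine ⟨k + 1, by simpa using hk, by push_cast; omega, by push_cast; omega, ?_⟩
          have : pvS (c :: rest) (k + 1 + 1) = pvDelta c + pvS rest (k + 1) := by
            simp [pvS]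
          rw [this]; omega
        · rintro ⟨k, hk, hb, he, hs⟩
          match k, hk with
          | 0, _ =>
            exfalso
            apply h1
            refine ⟨by simpa using hb, by simpa using he, ?_⟩
            simpa [pvS] using hs
          | k' + 1, hk =>
            refine ⟨k', by simpa using hk, by push_cast at hb ⊢; omega,
                    by push_cast at he ⊢; omega, ?_⟩
            have : pvS (c :: rest) (k' + 1 + 1) = pvDelta c + pvS rest (k' + 1) := by
              simp [pvS]
            rw [this] at hs; omega

-- pvSolve computes (segment balance, max over nonempty prefixes of the segment)
lemma pvSolve_spec (cs : List Char) : ∀ (d lo hi : Nat), hi - lo ≤ d → lo < hi → hi ≤ cs.length →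
    (pvSolve cs lo hi).1 = pvS cs hi - pvS cs lo ∧
    (∀ k, lo < k → k ≤ hi → pvS cs k - pvS cs lo ≤ (pvSolve cs lo hi).2) ∧
    (∃ k, lo < k ∧ k ≤ hi ∧ pvS cs k - pvS cs lo = (pvSolve cs lo hi).2) := by
  intro d
  induction d with
  | zero => intro lo hi h1 h2; omega
  | succ d ih =>
    intro lo hi hd hlt hle
    rw [pvSolve]
    by_cases hbase : hi ≤ lo + 1
    · have hhi : hi = lo + 1 := by omega
      rw [dif_pos hbase]
      have hS := pvS_succ cs lo (by omega)
      subst hhi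
      refine ⟨by dsimp; omega, ?_, ⟨lo + 1, by omega, by omega, by dsimp; omega⟩⟩
      intro k hk1 hk2
      have : k = lo + 1 := by omega
      subst this
      dsimp; omega
    · rw [dif_neg hbase]
      dsimp only
      set mid := (lo + hi) / 2 with hmid
      have hm1 : lo < mid := by omega
      have hm2 : mid < hi := by omega
      obtain ⟨hLb, hLm, kL, hkL1, hkL2, hkL3⟩ := ih lo mid (by omega) hm1 (by omega)
      obtain ⟨hRb, hRm, kR, hkR1, hkR2, hkR3⟩ := ih mid hi (by omega) hm2 hle
      refine ⟨by omega, ?_, ?_⟩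
      · intro k hk1 hk2
        by_cases hk : k ≤ mid
        · have := hLm k hk1 hk
          exact le_trans (by omega) (le_max_left _ _)
        · have := hRm k (by omega) hk2
          exact le_trans (by omega) (le_max_right _ _)
      · rcases max_choice (pvSolve cs lo mid).2 ((pvSolve cs lo mid).1 + (pvSolve cs mid hi).2) with hmax | hmax
        · exact ⟨kL, hkL1, by omega, by omega⟩
        · exact ⟨kR, by omega, hkR2, by omega⟩

theorem pv_main (sentence : String) (bg ed : Int) :
    judge_term_in_brackets sentence bg ed = judge_term_in_brackets_alt sentence bg ed := by
  unfold judge_term_in_brackets judge_term_in_brackets_alt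
  dsimp only
  set cs := sentence.toList with hcs
  rw [pvLoopA_iff]
  set start : Int := max 0 bg with hstart
  set stop : Int := min (cs.length : Int) ed with hstop
  have hstart0 : 0 ≤ start := le_max_left _ _
  have hbgstart : bg ≤ start := le_max_right _ _
  have hstopn : stop ≤ (cs.length : Int) := min_le_left _ _
  have hstoped : stop ≤ ed := min_le_right _ _
  by_cases hempty : stop ≤ start
  · rw [if_pos hempty]
    rw [decide_eq_false_iff_not]
    rintro ⟨k, hk, hb, he, -⟩
    simp only [zero_add] at hb he
    have hk' : (k : Int) < cs.length := by exact_mod_cast hk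
    have h1 : start ≤ (k : Int) := by
      rw [hstart]; exact max_le (Int.natCast_nonneg k) hb
    have h2 : (k : Int) < stop := by
      rw [hstop]; exact lt_min hk' he
    omega
  · rw [if_neg hempty]
    have hlt : start < stop := by omega
    have hstartN : ((start.toNat : Nat) : Int) = start := Int.toNat_of_nonneg hstart0
    have hstopN : ((stop.toNat : Nat) : Int) = stop := Int.toNat_of_nonneg (by omega)
    have hltN : start.toNat < stop.toNat := by omega
    have hleN : stop.toNat ≤ cs.length := by omega
    obtain ⟨-, hub, k0, hk01, hk02, hk03⟩ :=
      pvSolve_spec cs (stop.toNat - start.toNat) start.toNat stop.toNat (by omega) hltN hleN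
    rw [Bool.eq_iff_iff]
    simp only [decide_eq_true_iff]
    have hoff : ((cs.take start.toNat).map pvDelta).sum = pvS cs start.toNat := rfl
    rw [hoff]
    constructor
    · rintro ⟨k, hk, hb, he, hs⟩
      simp only [zero_add] at hb he hs
      have hk' : (k : Int) < cs.length := by exact_mod_cast hk
      have h1 : start.toNat ≤ k := by omega
      have h2 : k < stop.toNat := by omega
      have := hub (k + 1) (by omega) (by omega)
      omega
    · intro hpos
      refine ⟨k0 - 1, by omega, ?_, ?_, ?_⟩
      · simp only [zero_add]
        have : ((k0 - 1 : Nat) : Int) = (k0 : Int) - 1 := by omega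
        omega
      · simp only [zero_add]
        have : ((k0 - 1 : Nat) : Int) = (k0 : Int) - 1 := by omega
        omega
      · have : k0 - 1 + 1 = k0 := by omega
        rw [this]
        omega

-- ===== VERDICT (by name: the statement is the Claim_ definition above) =====
theorem judge_term_in_brackets_spec : Claim_equal_judge_term_in_brackets := by
  intro sentence bg ed _
  unfold Spec_judge_term_in_brackets
  exact pv_main sentence bg ed
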